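-- pv_equiv track=rewrite | github.com/Arthur-Dauphole/Projet-BRAIN | Arthur_2/BRAIN_PROJECT/modules/detector.py | _is_diagonal_line
-- ===== SOURCE A (Python) =====
-- from typing import List, Tuple, Optional
--
-- def _is_diagonal_line(pixels: List[Tuple[int, int]],
--                       min_r: int, min_c: int, height: int, width: int) -> bool:
--     """Check if pixels form a diagonal line."""
--     if height != width or height < 2:
--         return False
--
--     n = height
--     pixel_set = set(pixels)
--
--     # Check main diagonal (top-left to bottom-right)
--     main_diag = all((min_r + i, min_c + i) in pixel_set for i in range(n))
--     if main_diag and len(pixels) == n: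
--         return True
--
--     # Check anti-diagonal (top-right to bottom-left)
--     anti_diag = all((min_r + i, min_c + n - 1 - i) in pixel_set for i in range(n))
--     if anti_diag and len(pixels) == n:
--         return True
--
--     return False
-- ===== SOURCE B (Python) =====
-- from typing import List, Tuple
--
-- def _is_diagonal_line(pixels: List[Tuple[int, int]],
--                       min_r: int, min_c: int, height: int, width: int) -> bool:
--     """Check if pixels form a diagonal line (single pass marking hit offsets)."""
--     if height != width or height < 2:
--         return False
--     n = height
--     if len(pixels) != n:
--         return False
--     seen_main = set()
--     seen_anti = set()
--     for r, c in pixels: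
--         i = r - min_r
--         if 0 <= i < n:
--             if c - min_c == i:
--                 seen_main.add(i)
--             if c - min_c == n - 1 - i:
--                 seen_anti.add(i)
--     return len(seen_main) == n or len(seen_anti) == n
-- ===== Notes on version B (the rewrite author's own statement) =====
-- stated objective: alternative
-- what changed: Inverts the traversal: instead of building a set of the pixels and scanning the n expected diagonal cells for membership (plus a separate length test), B makes one pass over the pixels themselves, marking which main/anti diagonal offsets are hit, and accepts when len(pixels)==n and all n offsets of one diagonal were marked.
import Mathlib
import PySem

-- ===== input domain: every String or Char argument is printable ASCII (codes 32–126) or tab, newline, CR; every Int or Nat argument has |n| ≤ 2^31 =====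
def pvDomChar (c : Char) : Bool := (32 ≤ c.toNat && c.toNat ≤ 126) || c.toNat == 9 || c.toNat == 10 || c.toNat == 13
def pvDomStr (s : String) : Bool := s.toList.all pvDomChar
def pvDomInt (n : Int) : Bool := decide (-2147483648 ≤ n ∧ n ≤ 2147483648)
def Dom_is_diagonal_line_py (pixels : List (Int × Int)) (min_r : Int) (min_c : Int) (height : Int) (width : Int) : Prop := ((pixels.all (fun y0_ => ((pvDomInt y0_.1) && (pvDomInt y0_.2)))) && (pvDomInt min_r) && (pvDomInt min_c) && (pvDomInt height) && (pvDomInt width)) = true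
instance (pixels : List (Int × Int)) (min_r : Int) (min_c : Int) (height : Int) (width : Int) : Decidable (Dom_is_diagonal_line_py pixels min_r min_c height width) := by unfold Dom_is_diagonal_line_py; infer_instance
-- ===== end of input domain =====

-- B makes one pass over the pixels, marking which main/anti diagonal offsets are hit,
-- instead of A's pixel-set plus membership scan over the n expected cells (objective: alternative).


-- ===== PORT A =====
def is_diagonal_line_py (pixels : List (Int × Int)) (min_r : Int) (min_c : Int) (height : Int) (width : Int) : Bool :=
  if height ≠ width ∨ height < 2 then false
  else
    let n := height
    let pixel_set : PySem.Set (Int × Int) := PySem.Set.ofList pixels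
    let main_diag := (PySem.List.pyRange 0 n 1).all
      (fun i => PySem.Set.contains pixel_set (min_r + i, min_c + i))
    if main_diag && ((pixels.length : Int) == n) then true
    else
      let anti_diag := (PySem.List.pyRange 0 n 1).all
        (fun i => PySem.Set.contains pixel_set (min_r + i, min_c + n - 1 - i))
      if anti_diag && ((pixels.length : Int) == n) then true
      else false

-- ===== PORT B =====
-- per-pixel step of B's single pass: mark the pixel's diagonal offset in the two seen-sets
def diagStep (min_r min_c n : Int) (st : PySem.Set Int × PySem.Set Int)
    (p : Int × Int) : PySem.Set Int × PySem.Set Int :=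
  if 0 ≤ p.1 - min_r ∧ p.1 - min_r < n then
    (if p.2 - min_c == p.1 - min_r then PySem.Set.add st.1 (p.1 - min_r) else st.1,
     if p.2 - min_c == n - 1 - (p.1 - min_r) then PySem.Set.add st.2 (p.1 - min_r) else st.2)
  else st

def is_diagonal_line_py_alt (pixels : List (Int × Int)) (min_r : Int) (min_c : Int) (height : Int) (width : Int) : Bool :=
  if height ≠ width ∨ height < 2 then false
  else
    let n := height
    if (pixels.length : Int) ≠ n then false
    else
      let st := pixels.foldl (diagStep min_r min_c n)
        ((PySem.Set.empty : PySem.Set Int), (PySem.Set.empty : PySem.Set Int))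
      ((PySem.Set.len st.1 : Int) == n) || ((PySem.Set.len st.2 : Int) == n)

-- ===== PRECONDITION & SPEC =====
def Spec_is_diagonal_line_py (pixels : List (Int × Int)) (min_r : Int) (min_c : Int) (height : Int) (width : Int) (out : Bool) : Prop := out = is_diagonal_line_py_alt pixels min_r min_c height width
instance (pixels : List (Int × Int)) (min_r : Int) (min_c : Int) (height : Int) (width : Int) (out : Bool) : Decidable (Spec_is_diagonal_line_py pixels min_r min_c height width out) := by unfold Spec_is_diagonal_line_py; infer_instance

-- ===== CLAIM (what is proved, stated in full; the proofs are below) =====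
def Claim_equal_is_diagonal_line_py : Prop := ∀ (pixels : List (Int × Int)) (min_r : Int) (min_c : Int) (height : Int) (width : Int), Dom_is_diagonal_line_py pixels min_r min_c height width → Spec_is_diagonal_line_py pixels min_r min_c height width (is_diagonal_line_py pixels min_r min_c height width)

-- ===== LEMMAS AND PROOFS =====

-- membership in an 'if c then add s i else s'
lemma mem_ite_add {c : Prop} [Decidable c] (s : PySem.Set Int) (i x : Int) :
    x ∈ (if c then PySem.Set.add s i else s) ↔ x ∈ s ∨ (c ∧ x = i) := by
  split_ifs with h
  · rw [PySem.Set.mem_add]; tauto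
  · tauto

-- membership in B's seen-sets after the fold
lemma mem_fold_fst (min_r min_c n : Int) (pixels : List (Int × Int))
    (s : PySem.Set Int × PySem.Set Int) (x : Int) :
    x ∈ (pixels.foldl (diagStep min_r min_c n) s).1
      ↔ x ∈ s.1 ∨ (0 ≤ x ∧ x < n ∧ (min_r + x, min_c + x) ∈ pixels) := by
  induction pixels generalizing s with
  | nil => simp
  | cons p ps ih =>
    simp only [List.foldl_cons, ih, List.mem_cons]
    have hstep : x ∈ (diagStep min_r min_c n s p).1
        ↔ x ∈ s.1 ∨ (0 ≤ x ∧ x < n ∧ (min_r + x, min_c + x) = p) := by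
      unfold diagStep
      by_cases h1 : 0 ≤ p.1 - min_r ∧ p.1 - min_r < n
      · rw [if_pos h1]
        rw [show ((if (p.2 - min_c == p.1 - min_r) = true then PySem.Set.add s.1 (p.1 - min_r) else s.1,
            if (p.2 - min_c == n - 1 - (p.1 - min_r)) = true then PySem.Set.add s.2 (p.1 - min_r) else s.2) :
            PySem.Set Int × PySem.Set Int).1
          = (if (p.2 - min_c == p.1 - min_r) = true then PySem.Set.add s.1 (p.1 - min_r) else s.1) from rfl]
        rw [mem_ite_add]
        by_cases hm : x ∈ s.1
        · simp [hm]
        · simp only [hm, false_or, beq_iff_eq, Prod.ext_iff]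
          omega
      · rw [if_neg h1]
        by_cases hm : x ∈ s.1
        · simp [hm]
        · simp only [hm, false_or, Prod.ext_iff]
          constructor
          · exact fun h => h.elim
          · rintro ⟨h0, hn, hp1, hp2⟩
            exact absurd ⟨by omega, by omega⟩ h1
    rw [hstep]
    tauto

lemma mem_fold_snd (min_r min_c n : Int) (pixels : List (Int × Int))
    (s : PySem.Set Int × PySem.Set Int) (x : Int) :
    x ∈ (pixels.foldl (diagStep min_r min_c n) s).2
      ↔ x ∈ s.2 ∨ (0 ≤ x ∧ x < n ∧ (min_r + x, min_c + n - 1 - x) ∈ pixels) := by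
  induction pixels generalizing s with
  | nil => simp
  | cons p ps ih =>
    simp only [List.foldl_cons, ih, List.mem_cons]
    have hstep : x ∈ (diagStep min_r min_c n s p).2
        ↔ x ∈ s.2 ∨ (0 ≤ x ∧ x < n ∧ (min_r + x, min_c + n - 1 - x) = p) := by
      unfold diagStep
      by_cases h1 : 0 ≤ p.1 - min_r ∧ p.1 - min_r < n
      · rw [if_pos h1]
        rw [show ((if (p.2 - min_c == p.1 - min_r) = true then PySem.Set.add s.1 (p.1 - min_r) else s.1,
            if (p.2 - min_c == n - 1 - (p.1 - min_r)) = true then PySem.Set.add s.2 (p.1 - min_r) else s.2) :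
            PySem.Set Int × PySem.Set Int).2
          = (if (p.2 - min_c == n - 1 - (p.1 - min_r)) = true then PySem.Set.add s.2 (p.1 - min_r) else s.2) from rfl]
        rw [mem_ite_add]
        by_cases hm : x ∈ s.2
        · simp [hm]
        · simp only [hm, false_or, beq_iff_eq, Prod.ext_iff]
          omega
      · rw [if_neg h1]
        by_cases hm : x ∈ s.2
        · simp [hm]
        · simp only [hm, false_or, Prod.ext_iff]
          constructor
          · exact fun h => h.elim
          · rintro ⟨h0, hn, hp1, hp2⟩
            exact absurd ⟨by omega, by omega⟩ h1
    rw [hstep]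
    tauto

-- the fold preserves Nodup of both components
lemma nodup_fold (min_r min_c n : Int) (pixels : List (Int × Int))
    (s : PySem.Set Int × PySem.Set Int) (h1 : s.1.Nodup) (h2 : s.2.Nodup) :
    (pixels.foldl (diagStep min_r min_c n) s).1.Nodup
      ∧ (pixels.foldl (diagStep min_r min_c n) s).2.Nodup := by
  induction pixels generalizing s with
  | nil => exact ⟨h1, h2⟩
  | cons p ps ih =>
    simp only [List.foldl_cons]
    apply ih
    · unfold diagStep
      split_ifs <;> first | exact PySem.Set.nodup_add _ _ h1 | exact h1
    · unfold diagStep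
      split_ifs <;> first | exact PySem.Set.nodup_add _ _ h2 | exact h2

-- a Nodup list of Ints inside [0, n) has length n iff it contains every i < n
lemma len_eq_iff_full (s : List Int) (n : Nat) (hnd : s.Nodup)
    (hb : ∀ x ∈ s, 0 ≤ x ∧ x < (n : Int)) :
    (s.length = n ↔ ∀ i : Nat, i < n → (i : Int) ∈ s) := by
  set R : List Int := (List.range n).map (fun k : Nat => (k : Int)) with hR
  have hRnd : R.Nodup := List.Nodup.map (fun a b h => Nat.cast_injective h) (List.nodup_range)
  have hRlen : R.length = n := by simp [hR]
  have hmemR : ∀ x : Int, x ∈ R ↔ 0 ≤ x ∧ x < (n : Int) := by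
    intro x
    simp only [hR, List.mem_map, List.mem_range]
    constructor
    · rintro ⟨k, hk, rfl⟩; exact ⟨by positivity, by exact_mod_cast hk⟩
    · rintro ⟨h0, hn⟩
      exact ⟨x.toNat, by omega, by omega⟩
  have hsub : s.Subperm R := hnd.subperm (fun x hx => (hmemR x).2 (hb x hx))
  constructor
  · intro hlen
    have hperm : s.Perm R := hsub.perm_of_length_le (by omega)
    intro i hi
    exact hperm.mem_iff.2 ((hmemR _).2 ⟨by positivity, by exact_mod_cast hi⟩)
  · intro hfull
    have hsub2 : R.Subperm s := hRnd.subperm (by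
      intro x hx
      obtain ⟨h0, hn⟩ := (hmemR x).1 hx
      have := hfull x.toNat (by omega)
      simpa [Int.toNat_of_nonneg h0] using this)
    have := hsub.length_le
    have := hsub2.length_le
    omega

lemma key_lemma (pixels : List (Int × Int)) (min_r min_c height width : Int) :
    is_diagonal_line_py pixels min_r min_c height width
      = is_diagonal_line_py_alt pixels min_r min_c height width := by
  unfold is_diagonal_line_py is_diagonal_line_py_alt
  by_cases hg : height ≠ width ∨ height < 2
  · rw [if_pos hg, if_pos hg]
  · rw [if_neg hg, if_neg hg]
    have h2 : 2 ≤ height := by omega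
    obtain ⟨n, rfl⟩ : ∃ n : Nat, height = (n : Int) :=
      ⟨height.toNat, (Int.toNat_of_nonneg (by omega)).symm⟩
    by_cases hlen : (pixels.length : Int) ≠ (n : Int)
    · rw [if_pos hlen]
      have hlen' : ((pixels.length : Int) == (n : Int)) = false := by
        simpa using hlen
      simp [hlen']
    · rw [if_neg hlen]
      rw [ne_eq, not_not] at hlen
      have hlenb : ((pixels.length : Int) == (n : Int)) = true := by simpa using hlen
      set st := pixels.foldl (diagStep min_r min_c (n : Int))
        ((PySem.Set.empty : PySem.Set Int), (PySem.Set.empty : PySem.Set Int)) with hst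
      have hnd := nodup_fold min_r min_c (n : Int) pixels
        ((PySem.Set.empty : PySem.Set Int), (PySem.Set.empty : PySem.Set Int))
        (List.nodup_nil) (List.nodup_nil)
      have hmem1 : ∀ x : Int, x ∈ st.1 ↔ 0 ≤ x ∧ x < (n : Int) ∧ (min_r + x, min_c + x) ∈ pixels := by
        intro x; rw [hst, mem_fold_fst]; simp [PySem.Set.empty]
      have hmem2 : ∀ x : Int, x ∈ st.2 ↔ 0 ≤ x ∧ x < (n : Int) ∧ (min_r + x, min_c + (n : Int) - 1 - x) ∈ pixels := by
        intro x; rw [hst, mem_fold_snd]; simp [PySem.Set.empty]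
      have hfull1 := len_eq_iff_full st.1 n hnd.1
        (fun x hx => by have := (hmem1 x).1 hx; exact ⟨this.1, this.2.1⟩)
      have hfull2 := len_eq_iff_full st.2 n hnd.2
        (fun x hx => by have := (hmem2 x).1 hx; exact ⟨this.1, this.2.1⟩)
      have hrange : PySem.List.pyRange 0 (n : Int) 1
          = (List.range n).map (fun k : Nat => (k : Int)) := PySem.List.pyRange_zero_natCast n
      rw [Bool.eq_iff_iff]
      simp only [hrange, hlenb, Bool.and_true, Bool.if_true_left, Bool.if_false_right,
        Bool.or_eq_true, List.all_eq_true, List.forall_mem_map,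
        PySem.Set.contains, List.contains_iff_mem, PySem.Set.mem_ofList,
        PySem.Set.len, beq_iff_eq, Nat.cast_inj, decide_eq_true_eq]
      rw [hfull1, hfull2]
      constructor
      · rintro (h | h) <;> [left; right] <;>
          · intro i hi
            first
              | exact (hmem1 _).2 ⟨by positivity, by exact_mod_cast hi, h _ (List.mem_range.2 hi)⟩
              | exact (hmem2 _).2 ⟨by positivity, by exact_mod_cast hi, h _ (List.mem_range.2 hi)⟩
      · rintro (h | h) <;> [left; right] <;>
          · intro k hk
            have hk' := List.mem_range.1 hk
            first
              | exact ((hmem1 _).1 (h k hk')).2.2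
              | exact ((hmem2 _).1 (h k hk')).2.2

-- ===== VERDICT (by name: the statement is the Claim_ definition above) =====
theorem is_diagonal_line_py_spec : Claim_equal_is_diagonal_line_py := by
  intro pixels min_r min_c height width _
  exact key_lemma pixels min_r min_c height width
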